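-- pv_equiv track=rewrite | github.com/Houston4444/RaySession | src/shared/ray.py | is_git_taggable
-- ===== SOURCE A (Python) =====
-- def is_git_taggable(string: str) -> bool:
--     ''' know if a string can be a git tag, not used currently '''
--     if not string:
--         return False
--
--     if string.startswith('/'):
--         return False
--
--     if string.endswith('/'):
--         return False
--
--     if string.endswith('.'):
--         return False
--
--     for forbidden in (' ', '~', '^', ':', '?', '*',
--                       '[', '..', '@{', '\\', '//', ','):
--         if forbidden in string:
--             return False
--
--     if string == "@":
--         return False
--
--     return True
-- ===== SOURCE B (Python) =====
-- def is_git_taggable(string: str) -> bool: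
--     ''' know if a string can be a git tag, not used currently '''
--     if not string:
--         return False
--     prev = ''
--     for ch in string:
--         if ch in ' ~^:?*[\\,':
--             return False
--         if prev + ch in ('..', '@{', '//'):
--             return False
--         prev = ch
--     if string[0] == '/' or string[-1] in '/.':
--         return False
--     if string == '@':
--         return False
--     return True
-- ===== Notes on version B (the rewrite author's own statement) =====
-- stated objective: alternative
-- what changed: B replaces A's twelve separate substring scans (one per forbidden token) with a single left-to-right pass that keeps the previous character and rejects on a bad character or bad adjacent pair, plus O(1) boundary checks.
import Mathlib
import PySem

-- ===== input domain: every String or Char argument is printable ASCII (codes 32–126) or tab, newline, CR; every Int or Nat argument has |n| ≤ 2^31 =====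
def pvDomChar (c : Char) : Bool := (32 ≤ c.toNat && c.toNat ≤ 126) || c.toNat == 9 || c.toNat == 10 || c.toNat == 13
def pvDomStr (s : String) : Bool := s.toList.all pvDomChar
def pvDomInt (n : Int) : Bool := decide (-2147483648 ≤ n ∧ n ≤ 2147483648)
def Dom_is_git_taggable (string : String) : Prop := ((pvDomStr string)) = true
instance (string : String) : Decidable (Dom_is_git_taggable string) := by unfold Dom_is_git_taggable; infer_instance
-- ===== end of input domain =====

-- B replaces A's twelve separate substring scans with ONE left-to-right pass that remembers the
-- previous character (rejecting on a bad character or bad adjacent pair) plus O(1) boundary checks;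
-- objective: alternative (same asymptotic cost, genuinely different traversal).

-- ===== PORT A =====
-- A's for-loop over the tuple of forbidden substrings, with early return on a hit
def aLoop : List String → String → Bool
  | [], _ => false
  | f :: rest, s => if PySem.Str.isIn f s then true else aLoop rest s

def is_git_taggable (string : String) : Bool :=
  if string.toList = [] then false
  else if PySem.Str.startswith string "/" then false
  else if PySem.Str.endswith string "/" then false
  else if PySem.Str.endswith string "." then false
  else if aLoop [" ", "~", "^", ":", "?", "*", "[", "..", "@{", "\\", "//", ","] string then false
  else if string.toList = ['@'] then false
  else true

-- ===== PORT B =====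
def bBadChar (c : Char) : Bool :=
  c ∈ [' ', '~', '^', ':', '?', '*', '[', '\\', ',']

def bHit2 (p c : Char) : Bool :=
  (p == '.' && c == '.') || (p == '@' && c == '{') || (p == '/' && c == '/')

-- B's single pass: previous character (none before the first) and the remaining characters
def bScan : Option Char → List Char → Bool
  | _, [] => false
  | prev, c :: rest =>
    if bBadChar c then true
    else if (match prev with | some p => bHit2 p c | none => false) then true
    else bScan (some c) rest

def is_git_taggable_alt (string : String) : Bool :=
  let cs := string.toList
  if cs.isEmpty then false
  else if bScan none cs then false
  else if cs.head? == some '/' || cs.getLast? == some '/' || cs.getLast? == some '.' then false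
  else if cs = ['@'] then false
  else true

-- ===== PRECONDITION & SPEC =====
def Spec_is_git_taggable (string : String) (out : Bool) : Prop := out = is_git_taggable_alt string
instance (string : String) (out : Bool) : Decidable (Spec_is_git_taggable string out) := by unfold Spec_is_git_taggable; infer_instance

-- ===== CLAIM (what is proved, stated in full; the proofs are below) =====
def Claim_equal_is_git_taggable : Prop := ∀ (string : String), Dom_is_git_taggable string → Spec_is_git_taggable string (is_git_taggable string)

-- ===== LEMMAS AND PROOFS =====

lemma aLoop_any (fs : List String) (s : String) :
    aLoop fs s = fs.any (fun f => PySem.Str.isIn f s) := by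
  induction fs with
  | nil => rfl
  | cons f rest ih => cases h : PySem.Str.isIn f s <;> simp [aLoop, ih]

lemma bScan_some (cs : List Char) : ∀ p : Char,
    bScan (some p) cs =
      (cs.any bBadChar || ((p :: cs).zip cs).any (fun q => bHit2 q.1 q.2)) := by
  induction cs with
  | nil => intro p; rfl
  | cons c rest ih =>
    intro p
    cases h1 : bBadChar c <;> cases h2 : bHit2 p c <;>
      simp [bScan, h1, h2, ih c]

lemma bScan_none (cs : List Char) :
    bScan none cs = (cs.any bBadChar || (cs.zip cs.tail).any (fun q => bHit2 q.1 q.2)) := by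
  cases cs with
  | nil => rfl
  | cons c rest =>
    cases h1 : bBadChar c <;> simp [bScan, h1, bScan_some]

lemma pairAny_iff (a b : Char) (cs : List Char) :
    ((cs.zip cs.tail).any (fun q => q.1 == a && q.2 == b) = true) ↔ [a, b] <:+: cs := by
  induction cs with
  | nil => simp
  | cons x xs ih =>
    cases xs with
    | nil => simp [List.infix_cons_iff, List.cons_prefix_cons]
    | cons y ys =>
      rw [List.infix_cons_iff]
      simp only [List.tail_cons, List.zip_cons_cons, List.any_cons, Bool.or_eq_true,
        Bool.and_eq_true, beq_iff_eq, List.cons_prefix_cons]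
      constructor
      · rintro (⟨rfl, rfl⟩ | h)
        · exact Or.inl ⟨rfl, rfl, List.nil_prefix⟩
        · exact Or.inr (ih.mp h)
      · rintro (⟨rfl, rfl, -⟩ | h)
        · exact Or.inl ⟨rfl, rfl⟩
        · exact Or.inr (ih.mpr h)

lemma scan_iff (cs : List Char) :
    bScan none cs = true ↔
      ((∃ c ∈ cs, bBadChar c = true) ∨ ['.', '.'] <:+: cs ∨ ['@', '{'] <:+: cs ∨ ['/', '/'] <:+: cs) := by
  rw [bScan_none]
  simp only [Bool.or_eq_true, List.any_eq_true]
  constructor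
  · rintro (h | h)
    · exact Or.inl h
    · obtain ⟨⟨x, y⟩, hm, hq⟩ := h
      have hinf : [x, y] <:+: cs :=
        (pairAny_iff x y cs).mp (List.any_eq_true.mpr ⟨(x, y), hm, by simp⟩)
      simp only [bHit2, Bool.or_eq_true, Bool.and_eq_true, beq_iff_eq] at hq
      rcases hq with (hq | hq) | hq
      · obtain ⟨hx, hy⟩ := hq; rw [hx, hy] at hinf; exact Or.inr (Or.inl hinf)
      · obtain ⟨hx, hy⟩ := hq; rw [hx, hy] at hinf; exact Or.inr (Or.inr (Or.inl hinf))
      · obtain ⟨hx, hy⟩ := hq; rw [hx, hy] at hinf; exact Or.inr (Or.inr (Or.inr hinf))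
  · have pair : ∀ a b : Char, [a, b] <:+: cs → bHit2 a b = true →
        ∃ q ∈ cs.zip cs.tail, bHit2 q.1 q.2 = true := by
      intro a b hinf hh
      obtain ⟨q, hm, hq⟩ := List.any_eq_true.mp ((pairAny_iff a b cs).mpr hinf)
      simp only [Bool.and_eq_true, beq_iff_eq] at hq
      exact ⟨q, hm, by rw [hq.1, hq.2]; exact hh⟩
    rintro (h | h | h | h)
    · exact Or.inl h
    · exact Or.inr (pair _ _ h (by decide))
    · exact Or.inr (pair _ _ h (by decide))
    · exact Or.inr (pair _ _ h (by decide))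

lemma prefix_slash_iff (cs : List Char) : ['/'] <+: cs ↔ cs.head? = some '/' := by
  cases cs with
  | nil => simp
  | cons c rest => simp [List.cons_prefix_cons, eq_comm]

lemma suffix_singleton_iff (a : Char) (cs : List Char) : [a] <:+ cs ↔ cs.getLast? = some a := by
  rw [← List.reverse_prefix, ← List.head?_reverse]
  have : ([a].reverse : List Char) = [a] := rfl
  rw [this]
  cases h : cs.reverse with
  | nil => simp
  | cons c rest => simp [List.cons_prefix_cons, eq_comm]

lemma loop_iff (s : String) :
    aLoop [" ", "~", "^", ":", "?", "*", "[", "..", "@{", "\\", "//", ","] s = true ↔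
      ((∃ c ∈ s.toList, bBadChar c = true) ∨ ['.', '.'] <:+: s.toList ∨
        ['@', '{'] <:+: s.toList ∨ ['/', '/'] <:+: s.toList) := by
  rw [aLoop_any, List.any_eq_true]
  have single : ∀ (f : String) (c : Char), f.toList = [c] → bBadChar c = true →
      f.toList <:+: s.toList → (∃ c ∈ s.toList, bBadChar c = true) := by
    intro f c hf hb hin
    exact ⟨c, (List.singleton_infix_iff _ _).mp (hf ▸ hin), hb⟩
  constructor
  · rintro ⟨f, hf, hin⟩
    rw [PySem.Str.isIn_iff_infix] at hin
    simp only [List.mem_cons, List.not_mem_nil, or_false] at hf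
    rcases hf with rfl | rfl | rfl | rfl | rfl | rfl | rfl | rfl | rfl | rfl | rfl | rfl
    · exact Or.inl (single _ ' ' rfl (by decide) hin)
    · exact Or.inl (single _ '~' rfl (by decide) hin)
    · exact Or.inl (single _ '^' rfl (by decide) hin)
    · exact Or.inl (single _ ':' rfl (by decide) hin)
    · exact Or.inl (single _ '?' rfl (by decide) hin)
    · exact Or.inl (single _ '*' rfl (by decide) hin)
    · exact Or.inl (single _ '[' rfl (by decide) hin)
    · exact Or.inr (Or.inl hin)
    · exact Or.inr (Or.inr (Or.inl hin))
    · exact Or.inl (single _ '\\' rfl (by decide) hin)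
    · exact Or.inr (Or.inr (Or.inr hin))
    · exact Or.inl (single _ ',' rfl (by decide) hin)
  · have mk1 : ∀ (f : String) (c : Char), f.toList = [c] → c ∈ s.toList →
        PySem.Str.isIn f s = true := by
      intro f c hf hc
      rw [PySem.Str.isIn_iff_infix, hf]
      exact (List.singleton_infix_iff _ _).mpr hc
    rintro (⟨c, hc, hbad⟩ | h | h | h)
    · simp only [bBadChar, List.mem_cons, List.not_mem_nil, or_false, decide_eq_true_eq] at hbad
      rcases hbad with rfl | rfl | rfl | rfl | rfl | rfl | rfl | rfl | rfl
      · exact ⟨" ", by decide, mk1 _ _ rfl hc⟩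
      · exact ⟨"~", by decide, mk1 _ _ rfl hc⟩
      · exact ⟨"^", by decide, mk1 _ _ rfl hc⟩
      · exact ⟨":", by decide, mk1 _ _ rfl hc⟩
      · exact ⟨"?", by decide, mk1 _ _ rfl hc⟩
      · exact ⟨"*", by decide, mk1 _ _ rfl hc⟩
      · exact ⟨"[", by decide, mk1 _ _ rfl hc⟩
      · exact ⟨"\\", by decide, mk1 _ _ rfl hc⟩
      · exact ⟨",", by decide, mk1 _ _ rfl hc⟩
    · exact ⟨"..", by decide, by rw [PySem.Str.isIn_iff_infix]; exact h⟩
    · exact ⟨"@{", by decide, by rw [PySem.Str.isIn_iff_infix]; exact h⟩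
    · exact ⟨"//", by decide, by rw [PySem.Str.isIn_iff_infix]; exact h⟩

lemma startswith_head (s : String) :
    PySem.Str.startswith s "/" = (s.toList.head? == some '/') := by
  rw [Bool.eq_iff_iff]
  simp only [PySem.Str.startswith_eq, PySem.Chars.startswith_iff, beq_iff_eq]
  exact prefix_slash_iff s.toList

lemma endswith_last (s : String) (c : Char) (p : String) (hp : p.toList = [c]) :
    PySem.Str.endswith s p = (s.toList.getLast? == some c) := by
  rw [Bool.eq_iff_iff]
  simp only [PySem.Str.endswith_eq, PySem.Chars.endswith_iff, beq_iff_eq, hp]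
  exact suffix_singleton_iff c s.toList

lemma loop_eq_scan (s : String) :
    aLoop [" ", "~", "^", ":", "?", "*", "[", "..", "@{", "\\", "//", ","] s =
      bScan none s.toList := by
  rw [Bool.eq_iff_iff, loop_iff, scan_iff]

-- ===== VERDICT (by name: the statement is the Claim_ definition above) =====
theorem is_git_taggable_spec : Claim_equal_is_git_taggable := by
  intro s _
  show is_git_taggable s = is_git_taggable_alt s
  simp only [is_git_taggable, is_git_taggable_alt, loop_eq_scan, startswith_head,
    endswith_last s '/' "/" rfl, endswith_last s '.' "." rfl, List.isEmpty_iff]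
  split_ifs <;> simp_all
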